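-- pv_equiv track=rewrite | github.com/MichaelWehar/FourCornersProblem | python/lemma_2_case_1011_wip.py | createNextRightMap
-- ===== SOURCE A (Python) =====
-- def createNextRightMap(m, n, matrix):
--     # Create the nextOneRight map with row-wise traversal
--     #need to initialize this array, otherwise
--     #we get "list assignment index out of range" error
--     nextOneRight = [None for _ in range(m * n)]
--     for i in range(m):
--         foundOneYet = False
--         #we won't be able to map the first 1 we find in a row until
--         #we find its closest neighbor to the right
--         prevEntry = [None for _ in range(2)]
--         #prevEntry needs to be inside the first for loop so it can't be
--         #something from the above row. also needs to be initialized so we can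
--         #index into it
--         for j in range(n):
--             nextOneRight[i * n + j] = -1
--             if matrix[i][j] == True:
--                 if foundOneYet:
--                     prevRowIndex = prevEntry[0]
--                     prevColIndex = prevEntry[1]
--                     nextOneRight[prevRowIndex * n + prevColIndex] = j
--                     prevEntry = [i, j]
--                 else:
--                     #if this is the first one we find, don't add anything
--                     #to the mapping yet
--                     foundOneYet = True
--                     prevEntry = [i, j]
--     return nextOneRight
-- ===== SOURCE B (Python) =====
-- def createNextRightMap(m, n, matrix):
--     # Backward per-row scan: keep the column of the nearest 1 seen to the right.
--     nextOneRight = []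
--     for i in range(m):
--         rowRes = []
--         nextOne = -1
--         for j in range(n - 1, -1, -1):
--             if matrix[i][j] == True:
--                 rowRes.append(nextOne)
--                 nextOne = j
--             else:
--                 rowRes.append(-1)
--         rowRes.reverse()
--         nextOneRight.extend(rowRes)
--     return nextOneRight
-- ===== Notes on version B (the rewrite author's own statement) =====
-- stated objective: simpler
-- what changed: Replaces the forward scan with deferred back-patching through a prevEntry/foundOneYet state and a pre-sized flat array by a backward scan per row that keeps one integer (nearest 1 seen to the right) and emits each cell's answer directly, extending the output row by row.
-- outside the precondition, e.g. on createNextRightMap(-1, -1, []): A returns [None], B returns []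
import Mathlib
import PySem

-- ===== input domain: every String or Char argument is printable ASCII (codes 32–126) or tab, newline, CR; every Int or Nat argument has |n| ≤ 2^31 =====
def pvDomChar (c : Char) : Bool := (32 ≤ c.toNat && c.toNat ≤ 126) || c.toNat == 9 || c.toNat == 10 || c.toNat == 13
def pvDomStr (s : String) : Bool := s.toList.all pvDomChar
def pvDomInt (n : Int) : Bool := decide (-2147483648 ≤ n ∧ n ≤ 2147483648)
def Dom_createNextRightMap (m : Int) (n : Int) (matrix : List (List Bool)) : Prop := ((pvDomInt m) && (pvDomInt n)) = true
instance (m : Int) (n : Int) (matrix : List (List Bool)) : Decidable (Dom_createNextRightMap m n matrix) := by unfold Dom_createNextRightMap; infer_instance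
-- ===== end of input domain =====

-- B replaces A's forward scan with deferred back-patching (prevEntry/foundOneYet, pre-sized
-- flat array) by a backward per-row scan keeping one integer: the nearest 1 seen to the right.

-- ===== PORT A =====
-- literal transliteration of A; cells hold Option Int ([None]*(m*n), ints written in);
-- under Pre_ every cell gets written, so the final `.getD 0` never lands on a `none`,
-- and prevEntry's `.getD 0` is only read when foundOneYet, where prevEntry = [i, j].
def stepA (matrix : List (List Bool)) (n i : Int)
    (s : List (Option Int) × Bool × (Option Int × Option Int)) (j : Int) :
    List (Option Int) × Bool × (Option Int × Option Int) :=
  let nor := s.1.set (i*n+j).toNat (some (-1))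
  if PySem.List.pyGetD (PySem.List.pyGetD matrix i []) j false then
    if s.2.1 then
      let prevRowIndex := s.2.2.1.getD 0
      let prevColIndex := s.2.2.2.getD 0
      (nor.set (prevRowIndex * n + prevColIndex).toNat (some j), s.2.1, (some i, some j))
    else
      (nor, true, (some i, some j))
  else (nor, s.2.1, s.2.2)

def createNextRightMap (m : Int) (n : Int) (matrix : List (List Bool)) : List Int :=
  (((PySem.List.pyRange 0 m 1).foldl
      (fun nor i =>
        ((PySem.List.pyRange 0 n 1).foldl (stepA matrix n i) (nor, false, (none, none))).1)
      ((PySem.List.pyRange 0 (m*n) 1).map (fun _ => none))).map (fun o => o.getD 0))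

-- ===== PORT B =====
def stepB (matrix : List (List Bool)) (i : Int) (s : List Int × Int) (j : Int) : List Int × Int :=
  if PySem.List.pyGetD (PySem.List.pyGetD matrix i []) j false then (s.1 ++ [s.2], j)
  else (s.1 ++ [(-1 : Int)], s.2)

def createNextRightMap_alt (m : Int) (n : Int) (matrix : List (List Bool)) : List Int :=
  (PySem.List.pyRange 0 m 1).foldl
    (fun res i =>
      res ++ (((PySem.List.pyRange (n-1) (-1) (-1)).foldl (stepB matrix i) ([], -1)).1).reverse)
    []

-- ===== PRECONDITION & SPEC =====
-- Pre_ excludes (a) shapes on which A raises IndexError (fewer than m rows, or a used row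
-- shorter than n, when m,n > 0) and (b) m < 0 ∧ n < 0, where A returns a list of Nones —
-- not a value of the declared list-of-int type.
def Pre_createNextRightMap (m : Int) (n : Int) (matrix : List (List Bool)) : Prop :=
  ¬(m < 0 ∧ n < 0) ∧
  (0 < m → 0 < n → m.toNat ≤ matrix.length ∧ ∀ row ∈ matrix.take m.toNat, n.toNat ≤ row.length)
instance (m : Int) (n : Int) (matrix : List (List Bool)) : Decidable (Pre_createNextRightMap m n matrix) := by
  unfold Pre_createNextRightMap; infer_instance

def pvWitness_createNextRightMap : Int × Int × List (List Bool) :=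
  (2, 3, [[true, false, true], [false, true, true]])

def Spec_createNextRightMap (m : Int) (n : Int) (matrix : List (List Bool)) (out : List Int) : Prop := out = createNextRightMap_alt m n matrix
instance (m : Int) (n : Int) (matrix : List (List Bool)) (out : List Int) : Decidable (Spec_createNextRightMap m n matrix out) := by unfold Spec_createNextRightMap; infer_instance

-- ===== CLAIM (what is proved, stated in full; the proofs are below) =====
def Claim_equal_createNextRightMap : Prop := ∀ (m : Int) (n : Int) (matrix : List (List Bool)), Dom_createNextRightMap m n matrix → Pre_createNextRightMap m n matrix → Spec_createNextRightMap m n matrix (createNextRightMap m n matrix)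

-- ===== LEMMAS AND PROOFS =====

def rowSpec (off : Int) : List Bool → List Int × Int
  | [] => ([], -1)
  | b :: t =>
    let p := rowSpec (off+1) t
    if b then (p.2 :: p.1, off) else (-1 :: p.1, p.2)

def writeL : List (Option Int) → Nat → List Int → List (Option Int)
  | nor, _, [] => nor
  | nor, k, v :: vs => writeL (nor.set k (some v)) (k+1) vs

def rowsSpec (N : Nat) : List (List Bool) → List Int
  | [] => []
  | r :: t => (rowSpec 0 (r.take N)).1 ++ rowsSpec N t

lemma rowSpec_length (off : Int) (l : List Bool) : ((rowSpec off l).1).length = l.length := by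
  induction l generalizing off with
  | nil => simp [rowSpec]
  | cons b t ih => cases b <;> simp [rowSpec, ih]

lemma writeL_eq (vs : List Int) : ∀ (nor : List (Option Int)) (k : Nat),
    k + vs.length ≤ nor.length →
    writeL nor k vs = nor.take k ++ vs.map some ++ nor.drop (k + vs.length) := by
  induction vs with
  | nil => intro nor k h; simp [writeL]
  | cons v vs ih =>
    intro nor k h
    simp only [List.length_cons] at h
    have hk : k < nor.length := by omega
    rw [writeL, ih _ _ (by simp; omega)]
    rw [List.take_set, List.drop_set_of_lt (by omega)]
    have h1 : (nor.take (k+1)).set k (some v) = nor.take k ++ [some v] := by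
      rw [List.take_add_one, List.getElem?_eq_getElem hk]
      rw [List.set_append_right _ _ (by simp [Nat.min_eq_left (le_of_lt hk)])]
      simp [Nat.min_eq_left (le_of_lt hk)]
    have h2 : (nor.set k (some v)).take (k+1) = (nor.take (k+1)).set k (some v) := by
      rw [List.take_set]
    calc (nor.take (k+1)).set k (some v) ++ vs.map some ++ nor.drop (k+1+vs.length)
        = (nor.take k ++ [some v]) ++ vs.map some ++ nor.drop (k+1+vs.length) := by rw [h1]
      _ = nor.take k ++ (v :: vs).map some ++ nor.drop (k + (vs.length + 1)) := by
          simp [Nat.add_assoc, Nat.add_comm 1 vs.length]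
      _ = nor.take k ++ (v :: vs).map some ++ nor.drop (k + (v :: vs).length) := by simp

lemma pyRange_neg_one_snoc (a b : Int) (h : b ≤ a) :
    PySem.List.pyRange a (b-1) (-1) = PySem.List.pyRange a b (-1) ++ [b] := by
  rw [PySem.List.pyRange_neg_one, PySem.List.pyRange_neg_one]
  have h1 : (a-(b-1)).toNat = (a-b).toNat + 1 := by omega
  rw [h1, List.range_succ, List.map_append]
  have h2 : max (a-b) 0 = a - b := by omega
  simp [h2]

lemma innerA (matrix : List (List Bool)) (n i : Int) (r : List Bool)
    (hi : 0 ≤ i) (hn : 0 ≤ n)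
    (hrow : i.toNat < matrix.length) (hr : matrix[i.toNat] = r)
    (hlen : n.toNat ≤ r.length) :
    ∀ (k jN : Nat), jN + k = n.toNat →
    ∀ (nor : List (Option Int)) (found : Bool) (pe : Option Int × Option Int) (pcolN : Nat),
      (found = true → pe = (some i, some (pcolN : Int)) ∧ pcolN < jN) →
      ((PySem.List.pyRange (jN : Int) n 1).foldl (stepA matrix n i) (nor, found, pe)).1 =
        writeL (if found = true ∧ (rowSpec (jN : Int) ((r.take n.toNat).drop jN)).2 ≠ -1
                then nor.set (i.toNat * n.toNat + pcolN)
                       (some ((rowSpec (jN : Int) ((r.take n.toNat).drop jN)).2))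
                else nor)
          (i.toNat * n.toNat + jN) (rowSpec (jN : Int) ((r.take n.toNat).drop jN)).1 := by
  have h1 : PySem.List.pyGetD matrix i [] = r := by
    rw [← Int.toNat_of_nonneg hi, PySem.List.pyGetD_natCast, List.getD_eq_getElem _ _ hrow, hr]
  have hidx : ∀ t : Nat, (i*n+(t:Int)).toNat = i.toNat * n.toNat + t := by
    intro t
    have : i*n+(t:Int) = ((i.toNat * n.toNat + t : Nat) : Int) := by
      push_cast [Int.toNat_of_nonneg hi, Int.toNat_of_nonneg hn]; ring
    rw [this, Int.toNat_natCast]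
  intro k
  induction k with
  | zero =>
    intro jN hjk nor found pe pcolN hpe
    have hjN : (jN:Int) = n := by omega
    have hsl : (r.take n.toNat).drop jN = [] := by
      apply List.drop_of_length_le; simp; omega
    rw [hjN, PySem.List.pyRange_one_eq_nil le_rfl]
    simp [hsl, rowSpec, writeL]
  | succ k ih =>
    intro jN hjk nor found pe pcolN hpe
    have hjn : (jN:Int) < n := by omega
    have hjr : jN < r.length := by omega
    have hget : PySem.List.pyGetD (PySem.List.pyGetD matrix i []) (jN:Int) false = r[jN] := by
      rw [h1, PySem.List.pyGetD_natCast, List.getD_eq_getElem _ _ hjr]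
    have hsl : (r.take n.toNat).drop jN = r[jN] :: (r.take n.toNat).drop (jN+1) := by
      rw [List.drop_eq_getElem_cons (by simp; omega)]
      congr 1
      simp [List.getElem_take]
    have hcast : ((jN:Int)+1) = (((jN+1:Nat)):Int) := by push_cast; ring
    rw [PySem.List.pyRange_one_cons hjn, List.foldl_cons, hsl]
    simp only [rowSpec]
    rw [hcast]
    cases hb : r[jN] with
    | false =>
      simp only [stepA, hget, hb, if_false, Bool.false_eq_true, hidx jN]
      rw [ih (jN+1) (by omega) _ found pe pcolN
        (by intro hf; exact ⟨(hpe hf).1, by have := (hpe hf).2; omega⟩)]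
      rw [← hcast]
      cases hf : found with
      | false => simp [writeL, Nat.add_assoc]
      | true =>
        obtain ⟨hpe1, hpe2⟩ := hpe hf
        by_cases hp : (rowSpec ((jN:Int)+1) ((r.take n.toNat).drop (jN+1))).2 = -1
        · simp [hp, writeL, Nat.add_assoc]
        · simp only [hf, hp, true_and, ne_eq, not_false_iff, if_true, writeL]
          rw [List.set_comm _ _ (by omega : i.toNat * n.toNat + pcolN ≠ i.toNat * n.toNat + jN)]
          simp [Nat.add_assoc]
    | true =>
      cases hf : found with
      | false =>
        simp only [stepA, hget, hb, hf, if_true, Bool.false_eq_true, if_false, hidx jN]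
        rw [ih (jN+1) (by omega) _ true (some i, some (jN:Int)) jN
          (by intro _; exact ⟨rfl, by omega⟩)]
        rw [← hcast]
        by_cases hp : (rowSpec ((jN:Int)+1) ((r.take n.toNat).drop (jN+1))).2 = -1
        · simp [hp, writeL, Nat.add_assoc]
        · simp only [hp, true_and, ne_eq, not_false_iff, if_true, if_false, writeL,
            Bool.false_eq_true, false_and]
          rw [List.set_set]
          simp [Nat.add_assoc]
      | true =>
        obtain ⟨hpe1, hpe2⟩ := hpe hf
        simp only [stepA, hget, hb, hf, if_true, hpe1, Option.getD_some, hidx jN, hidx pcolN]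
        rw [ih (jN+1) (by omega) _ true (some i, some (jN:Int)) jN
          (by intro _; exact ⟨rfl, by omega⟩)]
        rw [← hcast]
        have hne : i.toNat * n.toNat + pcolN ≠ i.toNat * n.toNat + jN := by omega
        have hj1 : ¬((jN:Int) = -1) := by omega
        by_cases hp : (rowSpec ((jN:Int)+1) ((r.take n.toNat).drop (jN+1))).2 = -1
        · simp only [hp, hj1, ne_eq, not_true, if_false, if_true, true_and, writeL,
            not_false_iff]
          rw [List.set_comm _ _ hne]
          simp [Nat.add_assoc]
        · simp only [hp, hj1, true_and, ne_eq, not_false_iff, if_true, writeL]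
          rw [List.set_comm _ _ hne.symm, List.set_set, List.set_comm _ _ hne]
          simp [Nat.add_assoc]


lemma innerB (matrix : List (List Bool)) (n i : Int) (r : List Bool)
    (hi : 0 ≤ i) (hn : 0 ≤ n)
    (hrow : i.toNat < matrix.length) (hr : matrix[i.toNat] = r)
    (hlen : n.toNat ≤ r.length) :
    ∀ (k jN : Nat), jN + k = n.toNat →
      (PySem.List.pyRange (n-1) ((jN : Int)-1) (-1)).foldl (stepB matrix i) ([], -1) =
        (((rowSpec (jN : Int) ((r.take n.toNat).drop jN)).1).reverse,
          (rowSpec (jN : Int) ((r.take n.toNat).drop jN)).2) := by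
  have h1 : PySem.List.pyGetD matrix i [] = r := by
    rw [← Int.toNat_of_nonneg hi, PySem.List.pyGetD_natCast, List.getD_eq_getElem _ _ hrow, hr]
  intro k
  induction k with
  | zero =>
    intro jN hjk
    have hjN : (jN:Int) = n := by omega
    have hsl : (r.take n.toNat).drop jN = [] := by
      apply List.drop_of_length_le; simp; omega
    rw [hjN, hsl]
    rw [show PySem.List.pyRange (n-1) (n-1) (-1) = [] from by
      rw [PySem.List.pyRange_neg_one]; simp]
    simp [rowSpec]
  | succ k ih =>
    intro jN hjk
    have hjr : jN < r.length := by omega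
    have hget : PySem.List.pyGetD (PySem.List.pyGetD matrix i []) (jN:Int) false = r[jN] := by
      rw [h1, PySem.List.pyGetD_natCast, List.getD_eq_getElem _ _ hjr]
    have hsl : (r.take n.toNat).drop jN = r[jN] :: (r.take n.toNat).drop (jN+1) := by
      rw [List.drop_eq_getElem_cons (by simp; omega)]
      congr 1
      simp [List.getElem_take]
    have hcast : ((jN:Int)+1) = (((jN+1:Nat)):Int) := by push_cast; ring
    rw [pyRange_neg_one_snoc _ _ (by omega), List.foldl_append, List.foldl_cons, List.foldl_nil]
    have hr2 : PySem.List.pyRange (n-1) ((jN:Int)) (-1) = PySem.List.pyRange (n-1) (((jN+1:Nat):Int)-1) (-1) := by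
      congr 1; push_cast; ring
    rw [hr2, ih (jN+1) (by omega), hsl]
    simp only [rowSpec]
    rw [hcast]
    cases hb : r[jN] with
    | false => simp [stepB, hget, hb]
    | true => simp [stepB, hget, hb]

lemma outerA (matrix : List (List Bool)) (m n : Int) (hm : 0 ≤ m) (hn : 0 < n)
    (hrows : m.toNat ≤ matrix.length)
    (hcols : ∀ row ∈ matrix.take m.toNat, n.toNat ≤ row.length) :
    ∀ (k iN : Nat), iN + k = m.toNat →
    ∀ (done : List Int) (rest : List (Option Int)),
      done.length = iN * n.toNat → rest.length = k * n.toNat →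
      (PySem.List.pyRange (iN : Int) m 1).foldl
          (fun nor i =>
            ((PySem.List.pyRange 0 n 1).foldl (stepA matrix n i) (nor, false, (none, none))).1)
          (done.map some ++ rest)
        = (done ++ rowsSpec n.toNat ((matrix.drop iN).take k)).map some := by
  intro k
  induction k with
  | zero =>
    intro iN hik done rest hd hrest
    have hnil : rest = [] := List.eq_nil_iff_length_eq_zero.mpr (by simp [hrest])
    subst hnil
    have hiN : (iN:Int) = m := by omega
    rw [hiN, PySem.List.pyRange_one_eq_nil le_rfl]
    simp [rowsSpec]
  | succ k ih =>
    intro iN hik done rest hd hrest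
    have hilen : iN < matrix.length := by omega
    have him : (iN:Int) < m := by omega
    have hrlen : n.toNat ≤ matrix[iN].length := by
      apply hcols
      have hgt : (matrix.take m.toNat)[iN]'(by simp; omega) = matrix[iN] := List.getElem_take
      rw [← hgt]; exact List.getElem_mem _
    have hcast : ((iN:Int)+1) = (((iN+1:Nat)):Int) := by push_cast; ring
    rw [PySem.List.pyRange_one_cons him, List.foldl_cons]
    have hA := innerA matrix n (iN:Int) (matrix[iN]) (by positivity) (le_of_lt hn)
      (by simpa using hilen) (by simp) hrlen
      n.toNat 0 (by omega) (done.map some ++ rest) false (none, none) 0 (by simp)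
    simp only [Int.toNat_natCast, Nat.add_zero, Nat.cast_zero, Bool.false_eq_true, false_and,
      if_false, List.drop_zero] at hA
    simp only [hA]
    have hres_len : ((rowSpec 0 ((matrix[iN].take n.toNat))).1).length = n.toNat := by
      rw [rowSpec_length]; simp; omega
    have hwl : writeL (done.map some ++ rest) (iN * n.toNat)
        (rowSpec 0 (matrix[iN].take n.toNat)).1
        = ((done ++ (rowSpec 0 (matrix[iN].take n.toNat)).1).map some) ++ rest.drop n.toNat := by
      rw [writeL_eq _ _ _ (by
        simp only [List.length_append, List.length_map, hd, hrest, hres_len]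
        rw [Nat.succ_mul]
        exact Nat.add_le_add_left (Nat.le_add_left _ _) _)]
      rw [show iN * n.toNat = (done.map (some : Int → Option Int)).length from by simp [hd]]
      rw [List.take_left, hres_len, List.drop_length_add_append]
      simp
    rw [hwl, hcast]
    rw [ih (iN+1) (by omega) (done ++ (rowSpec 0 (matrix[iN].take n.toNat)).1) (rest.drop n.toNat)
      (by simp [hd, hres_len, Nat.succ_mul, Nat.add_comm]) (by simp [hrest, Nat.succ_mul])]
    have hdrop : matrix.drop iN = matrix[iN] :: matrix.drop (iN+1) :=
      List.drop_eq_getElem_cons hilen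
    rw [hdrop, List.take_succ_cons]
    simp only [rowsSpec, List.map_append, List.append_assoc]

lemma outerB (matrix : List (List Bool)) (m n : Int) (hm : 0 ≤ m) (hn : 0 < n)
    (hrows : m.toNat ≤ matrix.length)
    (hcols : ∀ row ∈ matrix.take m.toNat, n.toNat ≤ row.length) :
    ∀ (k iN : Nat), iN + k = m.toNat →
    ∀ (acc : List Int),
      (PySem.List.pyRange (iN : Int) m 1).foldl
          (fun res i =>
            res ++ (((PySem.List.pyRange (n-1) (-1) (-1)).foldl (stepB matrix i) ([], -1)).1).reverse)
          acc
        = acc ++ rowsSpec n.toNat ((matrix.drop iN).take k) := by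
  intro k
  induction k with
  | zero =>
    intro iN hik acc
    have hiN : (iN:Int) = m := by omega
    rw [hiN, PySem.List.pyRange_one_eq_nil le_rfl]
    simp [rowsSpec]
  | succ k ih =>
    intro iN hik acc
    have hilen : iN < matrix.length := by omega
    have him : (iN:Int) < m := by omega
    have hrlen : n.toNat ≤ matrix[iN].length := by
      apply hcols
      have hgt : (matrix.take m.toNat)[iN]'(by simp; omega) = matrix[iN] := List.getElem_take
      rw [← hgt]; exact List.getElem_mem _
    have hcast : ((iN:Int)+1) = (((iN+1:Nat)):Int) := by push_cast; ring
    rw [PySem.List.pyRange_one_cons him, List.foldl_cons]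
    have hB := innerB matrix n (iN:Int) (matrix[iN]) (by positivity) (le_of_lt hn)
      (by simpa using hilen) (by simp) hrlen
      n.toNat 0 (by omega)
    rw [show ((0:Nat):Int) - 1 = -1 from by norm_num] at hB
    simp only [hB]
    rw [hcast]
    rw [ih (iN+1) (by omega)]
    have hdrop : matrix.drop iN = matrix[iN] :: matrix.drop (iN+1) :=
      List.drop_eq_getElem_cons hilen
    rw [hdrop, List.take_succ_cons]
    simp only [rowsSpec, List.reverse_reverse, List.append_assoc, Nat.cast_zero, List.drop_zero]


lemma pvFoldlFixed {α β : Type} (l : List β) (a : α) : l.foldl (fun x _ => x) a = a := by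
  induction l generalizing a with
  | nil => rfl
  | cons b t ih => simpa using ih a

lemma createNextRightMap_eq (m n : Int) (matrix : List (List Bool))
    (hP : Pre_createNextRightMap m n matrix) :
    createNextRightMap m n matrix = createNextRightMap_alt m n matrix := by
  obtain ⟨hneg, hshape⟩ := hP
  unfold createNextRightMap createNextRightMap_alt
  by_cases hm : 0 < m
  · by_cases hn : 0 < n
    · obtain ⟨hrows, hcols⟩ := hshape hm hn
      have hmn : m * n = ((m.toNat * n.toNat : Nat) : Int) := by
        push_cast [Int.toNat_of_nonneg (le_of_lt hm), Int.toNat_of_nonneg (le_of_lt hn)]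
        ring
      have hinit : ((PySem.List.pyRange 0 (m*n) 1).map (fun _ => (none : Option Int))).length
          = m.toNat * n.toNat := by
        rw [List.length_map, PySem.List.length_pyRange_one, hmn]
        omega
      have hA := outerA matrix m n (le_of_lt hm) hn hrows hcols m.toNat 0 (by omega)
        [] ((PySem.List.pyRange 0 (m*n) 1).map (fun _ => none)) (by simp) hinit
      have hB := outerB matrix m n (le_of_lt hm) hn hrows hcols m.toNat 0 (by omega) []
      simp only [Nat.cast_zero, List.map_nil, List.nil_append, List.drop_zero] at hA hB
      rw [hA, hB, List.map_map]
      simp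
    · have hn0 : n ≤ 0 := by omega
      have hmn : m * n ≤ 0 := mul_nonpos_iff.mpr (Or.inl ⟨le_of_lt hm, hn0⟩)
      have hrB : PySem.List.pyRange (n-1) (-1) (-1) = [] := by
        rw [PySem.List.pyRange_neg_one]
        simp
        omega
      simp only [PySem.List.pyRange_one_eq_nil hmn, PySem.List.pyRange_one_eq_nil hn0, hrB,
        List.foldl_nil, List.map_nil, List.reverse_nil, List.append_nil, pvFoldlFixed]
  · have hm0 : m ≤ 0 := by omega
    have hmn : m * n ≤ 0 := by
      rcases lt_or_ge m 0 with h | h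
      · have hn0 : 0 ≤ n := by by_contra hc; exact hneg ⟨h, by omega⟩
        exact mul_nonpos_iff.mpr (Or.inr ⟨hm0, hn0⟩)
      · have : m = 0 := by omega
        simp [this]
    simp only [PySem.List.pyRange_one_eq_nil hmn, PySem.List.pyRange_one_eq_nil hm0,
      List.foldl_nil, List.map_nil]

-- ===== VERDICT (by name: the statement is the Claim_ definition above) =====
theorem createNextRightMap_spec : Claim_equal_createNextRightMap := by
  intro m n matrix _hD hP
  unfold Spec_createNextRightMap
  exact createNextRightMap_eq m n matrix hP
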